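-- pv_equiv track=rewrite | github.com/ksomemo/Competitive-programming | atcoder/abc/103/C.py | f
-- ===== SOURCE A (Python) =====
-- def f(N, A):
--     """
--     直感: 最小公倍数,最大公約数
--         最小公倍数のm ならすべてのaで割り切れる
--         つまり最小公倍数-1 ならすべてのaについて m mod ai = ai - 1
--
--     m=a_MAX-1, (m mod a_MAX) が最大
--     ただし他のa=a_MAX-1 の場合、f(m)は小さくなってしまう
--     aiに対して1 <= m <= a_Max-1 をすべて試す: 10^5 * 3 * 10^3 => TLE
--     """
--     try:
--         # py3.5
--         from math import gcd
--     except: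
--         from fractions import gcd
--
--     def lcm(x, y):
--         return x * y // gcd(x, y)
--
--     m1 = lcm(A[0], A[1])
--     for a in A[2:]:
--         m1 = lcm(m1, a)
--
--     m = m1 - 1
--     ans = sum(m % a for a in A)
--
--     return ans
-- ===== SOURCE B (Python) =====
-- def f(N, A):
--     # lcm(A) - 1 is congruent to -1 modulo every element, so each term of the
--     # answer is just -1 % a; no lcm needs to be computed at all.
--     return sum(-1 % a for a in A)
-- ===== Notes on version B (the rewrite author's own statement) =====
-- stated objective: faster
-- what changed: Dropped the whole-list bignum lcm entirely: since lcm(A)-1 is congruent to -1 modulo every element, each summand equals -1 % a, so B is a single O(N) pass of constant-size arithmetic; Pre_ excludes only the inputs where A raises (fewer than two elements: IndexError; a zero element: ZeroDivisionError).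
import Mathlib
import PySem

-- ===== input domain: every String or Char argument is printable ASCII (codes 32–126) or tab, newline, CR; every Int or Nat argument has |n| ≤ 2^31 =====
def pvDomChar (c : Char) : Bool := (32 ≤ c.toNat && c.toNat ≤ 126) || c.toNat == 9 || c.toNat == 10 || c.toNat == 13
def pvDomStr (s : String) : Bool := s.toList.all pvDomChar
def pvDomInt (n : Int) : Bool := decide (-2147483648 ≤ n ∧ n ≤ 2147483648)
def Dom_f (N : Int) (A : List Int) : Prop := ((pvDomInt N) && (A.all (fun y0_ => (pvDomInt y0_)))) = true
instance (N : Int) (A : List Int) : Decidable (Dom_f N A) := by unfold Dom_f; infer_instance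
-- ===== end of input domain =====

-- B drops A's bignum whole-list lcm: each summand is just -1 % a, one O(N) pass (faster, asymptotic).

-- ===== PORT A =====
-- lcm(x, y) = x * y // gcd(x, y); Python's math.gcd = Int.gcd (nonnegative gcd of absolute values)
def pyLcm (x y : Int) : Int := PySem.Int.floordiv (x * y) (Int.gcd x y : Int)

def f (N : Int) (A : List Int) : Int :=
  -- A[0], A[1] raise IndexError when A has fewer than two elements: such inputs are outside Pre_f,
  -- so pyGetD's default is never reached there; A[2:] with nonnegative start is drop 2 (exact).
  let m1 := (A.drop 2).foldl pyLcm (pyLcm (PySem.List.pyGetD A 0 0) (PySem.List.pyGetD A 1 0))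
  let m := m1 - 1
  (A.map (fun a => PySem.Int.mod m a)).sum

-- ===== PORT B =====
def f_alt (N : Int) (A : List Int) : Int :=
  (A.map (fun a => PySem.Int.mod (-1) a)).sum

-- ===== PRECONDITION & SPEC =====
-- Pre_f is exactly where the Python A returns: with fewer than two elements A[1] raises IndexError,
-- and with a zero element A raises ZeroDivisionError (gcd 0 in lcm's //, or m % 0).
def Pre_f (N : Int) (A : List Int) : Prop := 2 ≤ A.length ∧ ∀ a ∈ A, a ≠ 0
instance (N : Int) (A : List Int) : Decidable (Pre_f N A) := by unfold Pre_f; infer_instance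
def pvWitness_f : Int × List Int := (3, [4, 6, -9])

def Spec_f (N : Int) (A : List Int) (out : Int) : Prop := out = f_alt N A
instance (N : Int) (A : List Int) (out : Int) : Decidable (Spec_f N A out) := by unfold Spec_f; infer_instance

-- ===== CLAIM (what is proved, stated in full; the proofs are below) =====
def Claim_equal_f : Prop := ∀ (N : Int) (A : List Int), Dom_f N A → Pre_f N A → Spec_f N A (f N A)

-- ===== LEMMAS AND PROOFS =====

-- pyLcm of two nonzero ints is a nonzero common multiple of both.
theorem pyLcm_step {x y : Int} (hx : x ≠ 0) (hy : y ≠ 0) :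
    pyLcm x y ≠ 0 ∧ x ∣ pyLcm x y ∧ y ∣ pyLcm x y := by
  have hg : (0 : Int) < (Int.gcd x y : Int) := by
    exact_mod_cast Int.gcd_pos_of_ne_zero_left y hx
  obtain ⟨y', hy'⟩ : ((Int.gcd x y : Int)) ∣ y := Int.gcd_dvd_right x y
  obtain ⟨x', hx'⟩ : ((Int.gcd x y : Int)) ∣ x := Int.gcd_dvd_left x y
  have hxy : x * y = (Int.gcd x y : Int) * (x * y') := by
    conv_lhs => rw [hy']
    ring
  have hval : pyLcm x y = x * y' := by
    unfold pyLcm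
    rw [PySem.Int.floordiv_eq_ediv_of_pos hg, hxy]
    exact Int.mul_ediv_cancel_left _ (by omega)
  have hswap : x * y' = x' * y := by
    conv_rhs => rw [hy']
    conv_lhs => rw [hx']
    ring
  refine ⟨?_, ?_, ?_⟩
  · rw [hval]
    exact mul_ne_zero hx (by rintro rfl; simp at hy'; omega)
  · rw [hval]; exact dvd_mul_right x y'
  · rw [hval, hswap]; exact dvd_mul_left y x'

-- Invariant of A's lcm fold: the result is nonzero, divisible by the seed and by every list element.
theorem foldl_lcm_inv (L : List Int) (m1 : Int) (hm : m1 ≠ 0) (hL : ∀ a ∈ L, a ≠ 0) :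
    L.foldl pyLcm m1 ≠ 0 ∧ m1 ∣ L.foldl pyLcm m1 ∧ ∀ a ∈ L, a ∣ L.foldl pyLcm m1 := by
  induction L generalizing m1 with
  | nil => exact ⟨hm, dvd_refl _, by simp⟩
  | cons b L ih =>
    have hb : b ≠ 0 := hL b (by simp)
    obtain ⟨h1, h2, h3⟩ := pyLcm_step hm hb
    obtain ⟨r1, r2, r3⟩ := ih (pyLcm m1 b) h1 (fun a ha => hL a (by simp [ha]))
    refine ⟨r1, dvd_trans h2 r2, ?_⟩
    intro a ha
    rcases List.mem_cons.1 ha with rfl | ha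
    · exact dvd_trans h3 r2
    · exact r3 a ha

-- Python's % depends on the dividend only through its residue: (m1 - 1) % a = -1 % a when a ∣ m1.
theorem mod_pred {a m1 : Int} (ha : a ≠ 0) (hd : a ∣ m1) :
    PySem.Int.mod (m1 - 1) a = PySem.Int.mod (-1) a := by
  obtain ⟨k, rfl⟩ := hd
  rcases lt_trichotomy 0 a with hpos | hz | hneg
  · rw [PySem.Int.mod_eq_emod_of_pos hpos, PySem.Int.mod_eq_emod_of_pos hpos]
    conv_lhs => rw [show a * k - 1 = -1 + k * a by ring]
    simp
  · omega
  · have h1 := PySem.Int.mod_neg_neg (1 - a * k) (-a)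
    rw [show -(1 - a * k) = a * k - 1 by ring, neg_neg] at h1
    have h2 := PySem.Int.mod_neg_neg 1 (-a)
    rw [show -(1 : Int) = -1 by ring, neg_neg] at h2
    rw [h1, h2, PySem.Int.mod_eq_emod_of_pos (by omega), PySem.Int.mod_eq_emod_of_pos (by omega)]
    congr 1
    conv_lhs => rw [show 1 - a * k = 1 + k * (-a) by ring]
    simp

-- ===== VERDICT (by name: the statement is the Claim_ definition above) =====
theorem f_spec : Claim_equal_f := by
  intro N A _ hpre
  obtain ⟨hlen, hnz⟩ := hpre
  match A, hlen with
  | a0 :: a1 :: rest, _ =>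
    unfold Spec_f f f_alt
    have ha0 : a0 ≠ 0 := hnz a0 (by simp)
    have ha1 : a1 ≠ 0 := hnz a1 (by simp)
    have hseed := pyLcm_step ha0 ha1
    have hget0 : PySem.List.pyGetD (a0 :: a1 :: rest) 0 0 = a0 := by simp [pysem]
    have hget1 : PySem.List.pyGetD (a0 :: a1 :: rest) 1 0 = a1 := by simp [pysem]
    simp only [hget0, hget1, List.drop_succ_cons, List.drop_zero]
    obtain ⟨hm1, hdvd0, hdvdL⟩ :=
      foldl_lcm_inv rest (pyLcm a0 a1) hseed.1 (fun a ha => hnz a (by simp [ha]))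
    set m1 := rest.foldl pyLcm (pyLcm a0 a1) with hm1def
    have hall : ∀ a ∈ a0 :: a1 :: rest, a ∣ m1 := by
      intro a ha
      rcases List.mem_cons.1 ha with rfl | ha
      · exact dvd_trans hseed.2.1 hdvd0
      rcases List.mem_cons.1 ha with rfl | ha
      · exact dvd_trans hseed.2.2 hdvd0
      · exact hdvdL a ha
    congr 1
    apply List.map_congr_left
    intro a ha
    exact mod_pred (hnz a ha) (hall a ha)
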